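-- pv_equiv track=rewrite | github.com/aarizag/Challenges | Encryption/hide_password.py | encrypt2
-- ===== SOURCE A (Python) =====
-- key_num = 7
--
-- def encrypt2(p: str):
--     i, k = 0, key_num << key_num
--     s = ""
--     for c in p:
--         while i % key_num != 0:
--             s += chr(k)
--             k = k >> 1 if k > 0 else key_num << key_num
--             i += 1
--         s += c
--         i += 1
--     return s
-- ===== SOURCE B (Python) =====
-- BASE = [896, 448, 224, 112, 56, 28, 14, 7, 3, 1, 0]  # the period-11 cycle of A's halving key
--
-- def encrypt2(p: str):
--     if not p:
--         return ""
--     parts = [p[0]]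
--     for i, c in enumerate(p[1:]):
--         parts.append(''.join(chr(BASE[(6 * i + j) % 11]) for j in range(6)))
--         parts.append(c)
--     return ''.join(parts)
-- ===== Notes on version B (the rewrite author's own statement) =====
-- stated objective: alternative
-- what changed: B replaces A's fused loop with its modular counter i and mutable halving key k by a precomputed period-11 junk table BASE, emitting each 6-char junk chunk by closed-form table lookup BASE[(6*i+j)%11] and interleaving chunks with the plaintext characters.
import Mathlib
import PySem

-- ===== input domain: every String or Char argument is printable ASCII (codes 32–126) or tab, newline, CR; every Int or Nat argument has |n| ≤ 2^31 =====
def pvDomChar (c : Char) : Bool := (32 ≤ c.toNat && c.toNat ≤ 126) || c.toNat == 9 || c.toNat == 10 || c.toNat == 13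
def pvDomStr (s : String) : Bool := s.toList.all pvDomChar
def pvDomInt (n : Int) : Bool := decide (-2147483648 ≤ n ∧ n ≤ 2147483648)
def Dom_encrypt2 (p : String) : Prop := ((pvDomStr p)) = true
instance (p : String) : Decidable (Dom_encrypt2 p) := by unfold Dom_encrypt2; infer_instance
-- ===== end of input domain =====

-- B replaces A's fused counter/halving-state loop by a closed-form period-11 junk table
-- interleaved chunkwise with the plaintext (objective: alternative decomposition, same cost).

-- ===== PORT A =====
-- the inner 'while i % 7 != 0' loop: emits chr(k), halves k (reset to 7 << 7 = 896 at 0), bumps i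
-- chr(k) ported as Char.ofNat k.toNat — exact here since k is always one of 896,448,…,1,0
def encJunk (i k : Int) (s : List Char) : Int × Int × List Char :=
  if PySem.Int.mod i 7 ≠ 0 then
    encJunk (i + 1) (if k > 0 then k >>> 1 else 7 <<< 7) (s ++ [Char.ofNat k.toNat])
  else (i, k, s)
  termination_by ((7 - PySem.Int.mod i 7).toNat % 7)
  decreasing_by
    simp only [PySem.Int.mod_eq_emod_of_pos (show (0:Int) < 7 by norm_num)] at *
    omega

def encLoop (cs : List Char) (i k : Int) (s : List Char) : List Char :=
  match cs with
  | [] => s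
  | c :: rest =>
    let r := encJunk i k s
    encLoop rest (r.1 + 1) r.2.1 (r.2.2 ++ [c])

def encrypt2 (p : String) : String :=
  String.ofList (encLoop p.toList 0 (7 <<< 7) [])

-- ===== PORT B =====
def pvBase : List Int := [896, 448, 224, 112, 56, 28, 14, 7, 3, 1, 0]

-- ''.join(chr(BASE[(t + j) % 11]) for j in range(6)) with t = 6*i
def junkChunk (t : Int) : List Char :=
  (PySem.List.pyRange 0 6 1).map (fun j =>
    Char.ofNat (PySem.List.pyGetD pvBase (PySem.Int.mod (t + j) 11) 0).toNat)

def encrypt2_alt (p : String) : String :=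
  match p.toList with
  | [] => ""
  | c :: rest =>
    String.ofList ((PySem.List.enumerate rest 0).foldl
      (fun acc ic => acc ++ junkChunk (6 * ic.1) ++ [ic.2]) [c])

-- ===== PRECONDITION & SPEC =====
def Spec_encrypt2 (p : String) (out : String) : Prop := out = encrypt2_alt p
instance (p : String) (out : String) : Decidable (Spec_encrypt2 p out) := by unfold Spec_encrypt2; infer_instance

-- ===== CLAIM (what is proved, stated in full; the proofs are below) =====
def Claim_equal_encrypt2 : Prop := ∀ (p : String), Dom_encrypt2 p → Spec_encrypt2 p (encrypt2 p)

-- ===== LEMMAS AND PROOFS =====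

-- A's key after t junk emissions, read off the period-11 table
def kAt (t : Nat) : Int := pvBase.getD (t % 11) 0

lemma kAt_step (t : Nat) : (if kAt t > 0 then kAt t >>> 1 else 7 <<< 7) = kAt (t + 1) := by
  have h : t % 11 = 0 ∨ t % 11 = 1 ∨ t % 11 = 2 ∨ t % 11 = 3 ∨ t % 11 = 4 ∨ t % 11 = 5 ∨
      t % 11 = 6 ∨ t % 11 = 7 ∨ t % 11 = 8 ∨ t % 11 = 9 ∨ t % 11 = 10 := by omega
  rcases h with h | h | h | h | h | h | h | h | h | h | h <;>
    · have h2 : (t + 1) % 11 = (t % 11 + 1) % 11 := by omega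
      rw [kAt, kAt, h2, h]
      decide

lemma encJunk_step (i k : Int) (s : List Char) (h : PySem.Int.mod i 7 ≠ 0) :
    encJunk i k s =
      encJunk (i + 1) (if k > 0 then k >>> 1 else 7 <<< 7) (s ++ [Char.ofNat k.toNat]) := by
  rw [Ne, PySem.Int.mod_eq_zero_iff_dvd] at h
  rw [encJunk.eq_def]; simp [h]

lemma encJunk_stop (i k : Int) (s : List Char) (h : PySem.Int.mod i 7 = 0) :
    encJunk i k s = (i, k, s) := by
  rw [PySem.Int.mod_eq_zero_iff_dvd] at h
  rw [encJunk.eq_def]; simp [h]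

lemma encJunk_run (m t : Nat) (s : List Char) :
    encJunk (7 * (m : Int) + 1) (kAt t) s =
      (7 * (m : Int) + 7, kAt (t + 6),
        s ++ [Char.ofNat (kAt t).toNat, Char.ofNat (kAt (t + 1)).toNat,
              Char.ofNat (kAt (t + 2)).toNat, Char.ofNat (kAt (t + 3)).toNat,
              Char.ofNat (kAt (t + 4)).toNat, Char.ofNat (kAt (t + 5)).toNat]) := by
  have hmod : ∀ d : Int, 0 ≤ d → d < 6 → PySem.Int.mod (7 * (m : Int) + 1 + d) 7 ≠ 0 := by
    intro d h0 h6
    rw [PySem.Int.mod_eq_emod_of_pos (by norm_num)]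
    omega
  have hstop : PySem.Int.mod (7 * (m : Int) + 1 + 6) 7 = 0 := by
    rw [PySem.Int.mod_eq_emod_of_pos (by norm_num)]; omega
  rw [encJunk_step _ _ _ (by simpa using hmod 0 (by omega) (by omega)), kAt_step,
      encJunk_step _ _ _ (by simpa using hmod 1 (by omega) (by omega)), kAt_step,
      encJunk_step _ _ _ (by simpa using hmod 2 (by omega) (by omega)), kAt_step,
      encJunk_step _ _ _ (by simpa using hmod 3 (by omega) (by omega)), kAt_step,
      encJunk_step _ _ _ (by simpa using hmod 4 (by omega) (by omega)), kAt_step,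
      encJunk_step _ _ _ (by simpa using hmod 5 (by omega) (by omega)), kAt_step,
      encJunk_stop _ _ _ (by simpa using hstop)]
  simp only [List.append_assoc, List.cons_append, List.nil_append]
  refine Prod.ext (by omega) (Prod.ext (by norm_num) rfl)

lemma pyGet_base (x : Int) (hx0 : 0 ≤ x) :
    PySem.List.pyGetD pvBase (PySem.Int.mod x 11) 0 = pvBase.getD (x.toNat % 11) 0 := by
  rw [PySem.Int.mod_eq_emod_of_pos (by norm_num)]
  rw [show x % 11 = ((x.toNat % 11 : Nat) : Int) by omega]
  rw [PySem.List.pyGetD_natCast]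

lemma junkChunk_nat (t : Nat) :
    junkChunk (t : Int) =
      [Char.ofNat (kAt t).toNat, Char.ofNat (kAt (t + 1)).toNat,
       Char.ofNat (kAt (t + 2)).toNat, Char.ofNat (kAt (t + 3)).toNat,
       Char.ofNat (kAt (t + 4)).toNat, Char.ofNat (kAt (t + 5)).toNat] := by
  have hr : PySem.List.pyRange 0 6 1 = [0, 1, 2, 3, 4, 5] := by decide
  rw [junkChunk, hr]
  simp only [List.map_cons, List.map_nil]
  rw [pyGet_base ((t : Int) + 0) (by omega), pyGet_base ((t : Int) + 1) (by omega),
      pyGet_base ((t : Int) + 2) (by omega), pyGet_base ((t : Int) + 3) (by omega),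
      pyGet_base ((t : Int) + 4) (by omega), pyGet_base ((t : Int) + 5) (by omega)]
  rw [show ((t : Int) + 0).toNat = t + 0 by omega, show ((t : Int) + 1).toNat = t + 1 by omega,
      show ((t : Int) + 2).toNat = t + 2 by omega, show ((t : Int) + 3).toNat = t + 3 by omega,
      show ((t : Int) + 4).toNat = t + 4 by omega, show ((t : Int) + 5).toNat = t + 5 by omega]
  simp [kAt]

-- the common interleaving both programs produce after the first character
def bridge : List Char → Nat → List Char
  | [], _ => []
  | c :: cs, m => junkChunk (6 * (m : Int)) ++ (c :: bridge cs (m + 1))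

lemma encLoop_bridge (rest : List Char) (m : Nat) (s : List Char) :
    encLoop rest (7 * (m : Int) + 1) (kAt (6 * m)) s = s ++ bridge rest m := by
  induction rest generalizing m s with
  | nil => simp [encLoop, bridge]
  | cons c cs ih =>
    rw [encLoop, encJunk_run m (6 * m) s]
    have h1 : (7 * (m : Int) + 7) + 1 = 7 * ((m + 1 : Nat) : Int) + 1 := by push_cast; ring
    have h2 : kAt (6 * m + 6) = kAt (6 * (m + 1)) := by ring_nf
    simp only [h1, h2]
    rw [ih (m + 1)]
    rw [bridge, show (6 * ((m : Nat) : Int)) = ((6 * m : Nat) : Int) by push_cast; ring,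
        junkChunk_nat (6 * m)]
    simp

lemma alt_fold (rest : List Char) (m : Nat) (acc : List Char) :
    (PySem.List.enumerate rest (m : Int)).foldl
      (fun acc ic => acc ++ junkChunk (6 * ic.1) ++ [ic.2]) acc = acc ++ bridge rest m := by
  induction rest generalizing m acc with
  | nil => simp [PySem.List.enumerate_nil, bridge]
  | cons c cs ih =>
    rw [PySem.List.enumerate_cons]
    simp only [List.foldl_cons]
    rw [show ((m : Int) + 1) = ((m + 1 : Nat) : Int) by push_cast; ring, ih (m + 1)]
    simp [bridge]

-- ===== VERDICT (by name: the statement is the Claim_ definition above) =====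
theorem encrypt2_spec : Claim_equal_encrypt2 := by
  intro p _
  unfold Spec_encrypt2 encrypt2 encrypt2_alt
  cases h : p.toList with
  | nil => rfl
  | cons c rest =>
    rw [encLoop, encJunk_stop _ _ _ (by decide)]
    have h896 : (7 <<< 7 : Int) = kAt (6 * 0) := by decide
    have h1 : ((0 : Int) + 1) = 7 * ((0 : Nat) : Int) + 1 := by norm_num
    simp only [h896, h1]
    rw [encLoop_bridge rest 0 ([] ++ [c])]
    rw [show ((0 : Int)) = ((0 : Nat) : Int) by norm_num, alt_fold rest 0 [c]]
    rfl
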